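-- pv_equiv track=rewrite | github.com/GRONGHU/Condensate | Analysis scripts/FirstPassage/First_Passage_Time.py | find_dwell_times_in
-- ===== SOURCE A (Python) =====
-- def find_dwell_times_in(seq):
--     """Calculate residence time inside the channel"""
--     events = []
--     in_event = False
--     start_index = -1
--
--     for i in range(len(seq)):
--         if seq[i] == 2:  # Enter event
--             if not in_event:
--                 in_event = True
--                 start_index = i
--         elif seq[i] == 1:  # Exit event
--             if in_event:
--                 end_index = i
--                 length = end_index - start_index + 1
--                 events.append(length)
--                 in_event = False
--         else:  # seq[i] == 0
--             pass
--     return events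
-- ===== SOURCE B (Python) =====
-- def find_dwell_times_in(seq):
--     """Calculate residence time inside the channel.
--
--     Staged approach: first collect all entry indices (value 2) and all exit
--     indices (value 1) into two lists, then merge-pair them with a single
--     two-pointer sweep: each entry index that lies after the last closed event
--     is paired with the first exit index at or after it.
--     """
--     entries = [i for i, v in enumerate(seq) if v == 2]
--     exits = [i for i, v in enumerate(seq) if v == 1]
--     events = []
--     j = 0
--     cursor = -1  # index of the last exit that closed an event
--     for e in entries:
--         if e <= cursor:
--             continue  # a 2 inside an already-open/closed event
--         while j < len(exits) and exits[j] < e: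
--             j += 1
--         if j == len(exits):
--             break  # trailing entry with no closing exit
--         cursor = exits[j]
--         j += 1
--         events.append(cursor - e + 1)
--     return events
-- ===== Notes on version B (the rewrite author's own statement) =====
-- stated objective: alternative
-- what changed: Replaces A's single-pass in_event state machine by a staged algorithm: two comprehension passes precompute the lists of entry indices (2s) and exit indices (1s), then a two-pointer merge pairs each entry after the last closed event with the first exit at or after it.
import Mathlib
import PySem

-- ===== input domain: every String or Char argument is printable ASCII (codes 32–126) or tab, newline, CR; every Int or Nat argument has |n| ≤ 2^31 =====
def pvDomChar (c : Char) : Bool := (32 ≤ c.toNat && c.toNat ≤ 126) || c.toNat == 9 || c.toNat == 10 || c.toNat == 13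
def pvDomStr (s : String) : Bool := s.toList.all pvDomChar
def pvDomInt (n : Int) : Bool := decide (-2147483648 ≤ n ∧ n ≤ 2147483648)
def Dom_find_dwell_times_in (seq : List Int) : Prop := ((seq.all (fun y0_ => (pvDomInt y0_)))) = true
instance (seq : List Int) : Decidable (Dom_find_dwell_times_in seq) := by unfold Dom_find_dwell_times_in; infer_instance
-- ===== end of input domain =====

-- B restructures A's single-pass in_event state machine into staged passes: precompute the
-- entry-index and exit-index lists, then pair them by a two-pointer merge (objective: alternative).

-- ===== PORT A =====
-- A: one pass over indices with an in_event flag and start_index; loop ported as a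
-- foldl over the enumerated list (same indices, same element values).
def find_dwell_times_in (seq : List Int) : List Int :=
  (PySem.List.enumerate seq 0).foldl
    (fun (st : List Int × Bool × Int) (p : Int × Int) =>
      let (events, in_event, start_index) := st
      if p.2 = 2 then
        if ¬ in_event then (events, true, p.1) else st
      else if p.2 = 1 then
        if in_event then (events ++ [p.1 - start_index + 1], false, start_index) else st
      else st)
    ([], false, -1) |>.1

-- ===== PORT B =====
-- B: comprehension passes collect entry indices (2s) and exit indices (1s); a two-pointer
-- merge pairs them.  The advancing index j into `exits` is carried as the remaining suffix
-- of the exits list (the while loop `exits[j] < e; j += 1` is pvDropLt).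
def pvDropLt (e : Int) : List Int → List Int
  | [] => []
  | x :: xs => if x < e then pvDropLt e xs else x :: xs

def pvPair : List Int → List Int → Int → List Int
  | [], _, _ => []
  | e :: es, xs, cursor =>
    if e ≤ cursor then pvPair es xs cursor          -- continue
    else match pvDropLt e xs with
      | [] => []                                     -- break: no closing exit
      | x :: rest => (x - e + 1) :: pvPair es rest x

def find_dwell_times_in_alt (seq : List Int) : List Int :=
  pvPair (((PySem.List.enumerate seq 0).filter (fun p => p.2 == 2)).map (fun p => p.1))
         (((PySem.List.enumerate seq 0).filter (fun p => p.2 == 1)).map (fun p => p.1))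
         (-1)

-- ===== PRECONDITION & SPEC =====
def Spec_find_dwell_times_in (seq : List Int) (out : List Int) : Prop := out = find_dwell_times_in_alt seq
instance (seq : List Int) (out : List Int) : Decidable (Spec_find_dwell_times_in seq out) := by unfold Spec_find_dwell_times_in; infer_instance

-- ===== CLAIM (what is proved, stated in full; the proofs are below) =====
def Claim_equal_find_dwell_times_in : Prop := ∀ (seq : List Int), Dom_find_dwell_times_in seq → Spec_find_dwell_times_in seq (find_dwell_times_in seq)

-- ===== LEMMAS AND PROOFS =====

-- Intermediate description of A as a pair of mutually recursive scans (proof helper only).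
mutual
  def pvScanEntry : List Int → Int → List Int
    | [], _ => []
    | x :: rest, i => if x ≠ 2 then pvScanEntry rest (i + 1) else pvScanExit rest (i + 1) i
  def pvScanExit : List Int → Int → Int → List Int
    | [], _, _ => []
    | x :: rest, i, start =>
      if x ≠ 1 then pvScanExit rest (i + 1) start
      else (i - start + 1) :: pvScanEntry rest (i + 1)
end

-- Loop body of port A, named for the invariant lemmas.
def pvStepA (st : List Int × Bool × Int) (p : Int × Int) : List Int × Bool × Int :=
  let (events, in_event, start_index) := st
  if p.2 = 2 then
    if ¬ in_event then (events, true, p.1) else st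
  else if p.2 = 1 then
    if in_event then (events ++ [p.1 - start_index + 1], false, start_index) else st
  else st

theorem pvFoldInvariant (seq : List Int) :
    ∀ (i : Int) (ev : List Int),
      (∀ s : Int, ((PySem.List.enumerate seq i).foldl pvStepA (ev, false, s)).1
          = ev ++ pvScanEntry seq i)
      ∧ (∀ s : Int, ((PySem.List.enumerate seq i).foldl pvStepA (ev, true, s)).1
          = ev ++ pvScanExit seq i s) := by
  induction seq with
  | nil => intro i ev; simp [PySem.List.enumerate_nil, pvScanEntry, pvScanExit]
  | cons x rest ih =>
    intro i ev
    constructor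
    · intro s
      rw [PySem.List.enumerate_cons, List.foldl_cons]
      by_cases hx2 : x = 2
      · have hstep : pvStepA (ev, false, s) (i, x) = (ev, true, i) := by
          simp [pvStepA, hx2]
        rw [hstep, (ih (i + 1) ev).2 i]
        simp [pvScanEntry, hx2]
      · have hstep : pvStepA (ev, false, s) (i, x) = (ev, false, s) := by
          simp only [pvStepA]; split_ifs <;> simp_all
        rw [hstep, (ih (i + 1) ev).1 s]
        simp [pvScanEntry, hx2]
    · intro s
      rw [PySem.List.enumerate_cons, List.foldl_cons]
      by_cases hx1 : x = 1
      · have hstep : pvStepA (ev, true, s) (i, x) = (ev ++ [i - s + 1], false, s) := by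
          simp [pvStepA, hx1]
        rw [hstep, (ih (i + 1) (ev ++ [i - s + 1])).1 s]
        simp [pvScanExit, hx1]
      · have hstep : pvStepA (ev, true, s) (i, x) = (ev, true, s) := by
          simp only [pvStepA]; split_ifs <;> simp_all
        rw [hstep, (ih (i + 1) ev).2 s]
        simp [pvScanExit, hx1]

-- indices of elements equal to v, enumerating from i
def pvIdx (v : Int) (seq : List Int) (i : Int) : List Int :=
  ((PySem.List.enumerate seq i).filter (fun p => p.2 == v)).map (fun p => p.1)

theorem pvIdx_nil (v i : Int) : pvIdx v [] i = [] := by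
  simp [pvIdx, PySem.List.enumerate_nil]

theorem pvIdx_cons (v x i : Int) (rest : List Int) :
    pvIdx v (x :: rest) i
      = if x = v then i :: pvIdx v rest (i + 1) else pvIdx v rest (i + 1) := by
  simp [pvIdx, PySem.List.enumerate_cons, List.filter_cons]
  by_cases h : x = v <;> simp [h]

theorem pvIdx_ge (v : Int) (seq : List Int) :
    ∀ i, ∀ e ∈ pvIdx v seq i, i ≤ e := by
  induction seq with
  | nil => intro i e he; simp [pvIdx_nil] at he
  | cons x rest ih =>
    intro i e he
    rw [pvIdx_cons] at he
    by_cases h : x = v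
    · simp [h] at he
      rcases he with h' | h'
      · omega
      · have := ih (i + 1) e h'; omega
    · simp [h] at he
      have := ih (i + 1) e he; omega

theorem pvDropLt_eq_self (e : Int) (xs : List Int) (h : ∀ x ∈ xs, e ≤ x) :
    pvDropLt e xs = xs := by
  cases xs with
  | nil => rfl
  | cons x r =>
    have : ¬ x < e := by have := h x (by simp); omega
    simp [pvDropLt, this]

theorem pvPair_drop_exit (es : List Int) :
    ∀ (xs : List Int) (c y : Int), (∀ a ∈ es, y < a) →
      pvPair es (y :: xs) c = pvPair es xs c := by
  induction es with
  | nil => intro xs c y _; rfl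
  | cons e es ih =>
    intro xs c y h
    have hy : y < e := h e (by simp)
    have hrest : ∀ a ∈ es, y < a := fun a ha => h a (by simp [ha])
    by_cases hc : e ≤ c
    · simp [pvPair, hc, ih xs c y hrest]
    · have : pvDropLt e (y :: xs) = pvDropLt e xs := by simp [pvDropLt, hy]
      simp [pvPair, hc, this]

-- the state of B just after taking entry `start`: exits xs remain, all ≥ start
def pvPairAfter (es xs : List Int) (start : Int) : List Int :=
  match xs with
  | [] => []
  | x :: rest => (x - start + 1) :: pvPair es rest x

theorem pvPairAfter_skip (e : Int) (es xs : List Int) (start : Int)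
    (h : ∀ x ∈ xs, e ≤ x) : pvPairAfter (e :: es) xs start = pvPairAfter es xs start := by
  cases xs with
  | nil => rfl
  | cons x r =>
    have hx : e ≤ x := h x (by simp)
    simp [pvPairAfter, pvPair, hx]

theorem pvPairScan (seq : List Int) :
    ∀ i : Int,
      (∀ c : Int, c < i → pvPair (pvIdx 2 seq i) (pvIdx 1 seq i) c = pvScanEntry seq i)
      ∧ (∀ s : Int, s < i → pvPairAfter (pvIdx 2 seq i) (pvIdx 1 seq i) s = pvScanExit seq i s) := by
  induction seq with
  | nil =>
    intro i
    constructor <;> intro c _ <;> simp [pvIdx_nil, pvPair, pvPairAfter, pvScanEntry, pvScanExit]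
  | cons x rest ih =>
    intro i
    have h2' : ∀ e ∈ pvIdx 2 rest (i + 1), i + 1 ≤ e := pvIdx_ge 2 rest (i + 1)
    have h1' : ∀ e ∈ pvIdx 1 rest (i + 1), i + 1 ≤ e := pvIdx_ge 1 rest (i + 1)
    by_cases hx2 : x = 2
    · have hE2 : pvIdx 2 (x :: rest) i = i :: pvIdx 2 rest (i + 1) := by
        rw [pvIdx_cons]; simp [hx2]
      have hE1 : pvIdx 1 (x :: rest) i = pvIdx 1 rest (i + 1) := by
        rw [pvIdx_cons]; simp [hx2]
      constructor
      · intro c hc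
        rw [hE2, hE1]
        have hnc : ¬ i ≤ c := by omega
        have hdrop : pvDropLt i (pvIdx 1 rest (i + 1)) = pvIdx 1 rest (i + 1) :=
          pvDropLt_eq_self _ _ (fun a ha => by have := h1' a ha; omega)
        have : pvPair (i :: pvIdx 2 rest (i + 1)) (pvIdx 1 rest (i + 1)) c
            = pvPairAfter (pvIdx 2 rest (i + 1)) (pvIdx 1 rest (i + 1)) i := by
          simp only [pvPair, hnc, ite_false, hdrop, pvPairAfter]
        rw [this, (ih (i + 1)).2 i (by omega)]
        simp [pvScanEntry, hx2]
      · intro s hs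
        rw [hE2, hE1]
        rw [pvPairAfter_skip i _ _ s (fun a ha => by have := h1' a ha; omega)]
        rw [(ih (i + 1)).2 s (by omega)]
        simp [pvScanExit, hx2]
    · by_cases hx1 : x = 1
      · have hE2 : pvIdx 2 (x :: rest) i = pvIdx 2 rest (i + 1) := by
          rw [pvIdx_cons]; simp [hx2]
        have hE1 : pvIdx 1 (x :: rest) i = i :: pvIdx 1 rest (i + 1) := by
          rw [pvIdx_cons]; simp [hx1]
        constructor
        · intro c hc
          rw [hE2, hE1]
          rw [pvPair_drop_exit _ _ c i (fun a ha => by have := h2' a ha; omega)]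
          rw [(ih (i + 1)).1 c (by omega)]
          simp [pvScanEntry, hx2]
        · intro s hs
          rw [hE2, hE1]
          have : pvPairAfter (pvIdx 2 rest (i + 1)) (i :: pvIdx 1 rest (i + 1)) s
              = (i - s + 1) :: pvPair (pvIdx 2 rest (i + 1)) (pvIdx 1 rest (i + 1)) i := rfl
          rw [this, (ih (i + 1)).1 i (by omega)]
          simp [pvScanExit, hx1]
      · have hE2 : pvIdx 2 (x :: rest) i = pvIdx 2 rest (i + 1) := by
          rw [pvIdx_cons]; simp [hx2]
        have hE1 : pvIdx 1 (x :: rest) i = pvIdx 1 rest (i + 1) := by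
          rw [pvIdx_cons]; simp [hx1]
        constructor
        · intro c hc
          rw [hE2, hE1, (ih (i + 1)).1 c (by omega)]
          simp [pvScanEntry, hx2]
        · intro s hs
          rw [hE2, hE1, (ih (i + 1)).2 s (by omega)]
          simp [pvScanExit, hx1]

-- ===== VERDICT (by name: the statement is the Claim_ definition above) =====
theorem find_dwell_times_in_spec : Claim_equal_find_dwell_times_in := by
  intro seq _
  unfold Spec_find_dwell_times_in
  have hA : find_dwell_times_in seq
      = ((PySem.List.enumerate seq 0).foldl pvStepA ([], false, (-1 : Int))).1 := rfl
  have hB : find_dwell_times_in_alt seq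
      = pvPair (pvIdx 2 seq 0) (pvIdx 1 seq 0) (-1) := rfl
  rw [hA, (pvFoldInvariant seq 0 []).1 (-1), hB,
      (pvPairScan seq 0).1 (-1) (by omega)]
  rfl
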